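-- pv_equiv track=rewrite | github.com/ganguloo/sandbox | gray/validator.py | generate_theorem1
-- ===== SOURCE A (Python) =====
-- def get_binary(val, n):
--     return [int(x) for x in format(val, f'0{n}b')]
--
-- def generate_theorem1(b, n):
--     ineqs = set()
--     b_bin = get_binary(b, n)
--     for k in range(1, n + 1):
--         if b_bin[k-1] == 0:
--             S_k = [j for j in range(1, k) if b_bin[j-1] == 1] + [k]
--             blocks = []
--             if S_k:
--                 current_block = [S_k[0]]
--                 for j in S_k[1:]:
--                     if j == current_block[-1] + 1:
--                         current_block.append(j)
--                     else:
--                         blocks.append(current_block)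
--                         current_block = [j]
--                 blocks.append(current_block)
--
--             p = len(blocks)
--             coeffs = [0] * n
--             for block in blocks:
--                 coeffs[block[0]-1] = 1
--                 for j in block[1:]:
--                     coeffs[j-1] = -1
--             ineqs.add((tuple(coeffs), p - 1))
--     return ineqs
-- ===== SOURCE B (Python) =====
-- def get_binary(val, n):
--     return [int(x) for x in format(val, f'0{n}b')]
--
-- def generate_theorem1(b, n):
--     # Dense single scan per k over bit positions 1..k; no sparse S_k list, no
--     # separate run-grouping pass: run starts are detected from the previous
--     # position's membership flag.
--     ineqs = set()
--     bits = get_binary(b, n)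
--     for k in range(1, n + 1):
--         if bits[k - 1] == 0:
--             coeffs = [0] * n
--             p = 0
--             prev = False
--             for j in range(1, k + 1):
--                 member = j == k or bits[j - 1] == 1
--                 if member:
--                     if prev:
--                         coeffs[j - 1] = -1
--                     else:
--                         coeffs[j - 1] = 1
--                         p += 1
--                 prev = member
--             ineqs.add((tuple(coeffs), p - 1))
--     return ineqs
-- ===== Notes on version B (the rewrite author's own statement) =====
-- stated objective: simpler
-- what changed: Per k, replaces building the sparse index list S_k plus a separate run-grouping loop plus a per-block coefficient loop by one dense scan over positions 1..k that writes each coefficient and counts run starts directly from the previous position's membership flag.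
import Mathlib
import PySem

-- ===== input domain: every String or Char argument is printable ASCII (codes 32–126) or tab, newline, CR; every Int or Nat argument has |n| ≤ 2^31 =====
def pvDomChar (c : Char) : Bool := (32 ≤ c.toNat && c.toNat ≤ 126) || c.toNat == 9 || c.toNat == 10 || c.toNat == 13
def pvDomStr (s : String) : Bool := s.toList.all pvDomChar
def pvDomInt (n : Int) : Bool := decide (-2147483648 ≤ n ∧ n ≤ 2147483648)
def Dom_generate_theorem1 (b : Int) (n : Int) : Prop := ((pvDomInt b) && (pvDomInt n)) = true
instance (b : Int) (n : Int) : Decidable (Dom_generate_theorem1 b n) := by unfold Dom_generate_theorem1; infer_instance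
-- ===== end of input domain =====

-- B replaces A's sparse S_k list + run-grouping pass + per-block coefficient pass by one
-- dense scan over positions 1..k (objective: simpler, same asymptotic cost).

-- ===== PORT A =====
-- binary digits of m, least significant first (helper for get_binary)
def natToBitsRev : Nat → List Int
  | 0 => []
  | m+1 => (((m+1) % 2 : Nat) : Int) :: natToBitsRev ((m+1)/2)
decreasing_by exact Nat.div_lt_self (Nat.succ_pos m) (by norm_num)

-- get_binary(val, n) = [int(x) for x in format(val, f'0{n}b')].
-- Exact for 0 ≤ val and 0 ≤ n (Pre_): MSB-first digits of val, zero-padded on the left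
-- to width n (format(0, ...) gives the single digit '0'); negative val or n make Python
-- raise ValueError and are excluded by Pre_.
def get_binary (val : Int) (n : Int) : List Int :=
  let raw := if val = 0 then [(0 : Int)] else (natToBitsRev val.toNat).reverse
  List.replicate (n.toNat - raw.length) 0 ++ raw

-- the body of A's grouping loop (current_block[-1] via getLast?.getD 0: the list is never empty)
def groupStep (st : List (List Int) × List Int) (j : Int) : List (List Int) × List Int :=
  if j == st.2.getLast?.getD 0 + 1 then (st.1, st.2 ++ [j]) else (st.1 ++ [st.2], [j])

-- the body of A's coefficient loop over one block (indices j-1 are always in range under Pre_,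
-- so Python's coeffs[j-1] = v is the total pySetD)
def writeBlock (c : List Int) (blk : List Int) : List Int :=
  blk.tail.foldl (fun c j => PySem.List.pySetD c (j - 1) (-1))
    (PySem.List.pySetD c (blk.head?.getD 0 - 1) 1)

-- A's loop body for one k (S_k, blocks, coeffs, the pair added to the set)
def akBody (L : List Int) (N : Nat) (k : Int) : List Int × Int :=
  let S_k := (PySem.List.pyRange 1 k 1).filter (fun j => PySem.List.pyGetD L (j - 1) 0 == 1) ++ [k]
  let blocks : List (List Int) :=
    match S_k with
    | [] => []
    | s0 :: rest =>
      let r := rest.foldl groupStep ([], [s0])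
      r.1 ++ [r.2]
  let coeffs := blocks.foldl writeBlock (List.replicate N 0)
  (coeffs, (blocks.length : Int) - 1)

def generate_theorem1 (b : Int) (n : Int) : List (List Int × Int) :=
  let b_bin := get_binary b n
  (PySem.List.pyRange 1 (n + 1) 1).foldl
    (fun ineqs k =>
      if PySem.List.pyGetD b_bin (k - 1) 0 == 0 then PySem.Set.add ineqs (akBody b_bin n.toNat k)
      else ineqs) []

-- ===== PORT B =====
-- B's inner-loop body: one position j, state (coeffs, p, prev-membership flag)
def bStep (L : List Int) (k : Int) (st : List Int × Int × Bool) (j : Int) : List Int × Int × Bool :=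
  let member := j == k || PySem.List.pyGetD L (j - 1) 0 == 1
  if member then
    if st.2.2 then (PySem.List.pySetD st.1 (j - 1) (-1), st.2.1, member)
    else (PySem.List.pySetD st.1 (j - 1) 1, st.2.1 + 1, member)
  else (st.1, st.2.1, member)

-- B's loop body for one k: a single dense scan over j = 1..k
def bkBody (L : List Int) (N : Nat) (k : Int) : List Int × Int :=
  let r := (PySem.List.pyRange 1 (k + 1) 1).foldl (bStep L k) (List.replicate N 0, 0, false)
  (r.1, r.2.1 - 1)

def generate_theorem1_alt (b : Int) (n : Int) : List (List Int × Int) :=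
  let bits := get_binary b n
  (PySem.List.pyRange 1 (n + 1) 1).foldl
    (fun ineqs k =>
      if PySem.List.pyGetD bits (k - 1) 0 == 0 then PySem.Set.add ineqs (bkBody bits n.toNat k)
      else ineqs) []

-- ===== PRECONDITION & SPEC =====
-- A raises ValueError when b < 0 (format gives '-…', int('-') fails) or n < 0 (bad format spec);
-- Pre_ excludes exactly those inputs.
def Pre_generate_theorem1 (b : Int) (n : Int) : Prop := 0 ≤ b ∧ 0 ≤ n
instance (b : Int) (n : Int) : Decidable (Pre_generate_theorem1 b n) := by
  unfold Pre_generate_theorem1; infer_instance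

def pvWitness_generate_theorem1 : Int × Int := (6, 3)

def Spec_generate_theorem1 (b : Int) (n : Int) (out : List (List Int × Int)) : Prop :=
  out = generate_theorem1_alt b n
instance (b : Int) (n : Int) (out : List (List Int × Int)) : Decidable (Spec_generate_theorem1 b n out) := by
  unfold Spec_generate_theorem1; infer_instance

-- ===== CLAIM (what is proved, stated in full; the proofs are below) =====
def Claim_equal_generate_theorem1 : Prop :=
  ∀ (b : Int) (n : Int), Dom_generate_theorem1 b n → Pre_generate_theorem1 b n →
    Spec_generate_theorem1 b n (generate_theorem1 b n)

-- ===== LEMMAS AND PROOFS =====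

-- The common write sequence: for the increasing member list S (prev = the previous member, if
-- any), aws prev S lists (position, coefficient) pairs — coefficient 1 at a run start (the
-- previous member is not position-1), -1 inside a run — and cnt prev S counts the run starts.
def aws : Option Int → List Int → List (Int × Int)
  | _, [] => []
  | prev, j :: rest => (j, if prev = some (j - 1) then (-1 : Int) else 1) :: aws (some j) rest

def cnt : Option Int → List Int → Int
  | _, [] => 0
  | prev, j :: rest => (if prev = some (j - 1) then 0 else 1) + cnt (some j) rest

def applyW (c : List Int) (ws : List (Int × Int)) : List Int :=
  ws.foldl (fun c w => PySem.List.pySetD c (w.1 - 1) w.2) c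

def blockWrites (blk : List Int) : List (Int × Int) :=
  (blk.head?.getD 0, (1 : Int)) :: blk.tail.map (fun j => (j, (-1 : Int)))

def blocksWrites (bs : List (List Int)) : List (Int × Int) := bs.flatMap blockWrites

theorem applyW_append (c : List Int) (ws ws' : List (Int × Int)) :
    applyW c (ws ++ ws') = applyW (applyW c ws) ws' := by
  simp [applyW, List.foldl_append]

theorem applyW_cons (c : List Int) (w : Int × Int) (ws : List (Int × Int)) :
    applyW c (w :: ws) = applyW (PySem.List.pySetD c (w.1 - 1) w.2) ws := rfl

theorem writeBlock_eq (c : List Int) (blk : List Int) :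
    writeBlock c blk = applyW c (blockWrites blk) := by
  rw [blockWrites, applyW, List.foldl_cons, List.foldl_map]
  rfl

theorem blocksWrites_append_singleton (bs : List (List Int)) (x : List Int) :
    blocksWrites (bs ++ [x]) = blocksWrites bs ++ blockWrites x := by
  simp [blocksWrites]

theorem blockWrites_append_singleton (cur : List Int) (j : Int) (h : cur ≠ []) :
    blockWrites (cur ++ [j]) = blockWrites cur ++ [(j, (-1 : Int))] := by
  cases cur with
  | nil => exact absurd rfl h
  | cons c0 ct => simp [blockWrites]

theorem foldl_writeBlock_eq (bs : List (List Int)) (c : List Int) :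
    bs.foldl writeBlock c = applyW c (blocksWrites bs) := by
  induction bs generalizing c with
  | nil => rfl
  | cons blk bs ih =>
    simp only [List.foldl_cons, ih, writeBlock_eq]
    rw [show blocksWrites (blk :: bs) = blockWrites blk ++ blocksWrites bs from rfl,
      applyW_append]

-- A's grouping fold, characterised: appending the final current block, the blocks produce
-- exactly the write sequence aws, and their number is counted by cnt.
theorem group_spec (rest : List Int) :
    ∀ (bs : List (List Int)) (cur : List Int), cur ≠ [] →
      blocksWrites ((rest.foldl groupStep (bs, cur)).1 ++ [(rest.foldl groupStep (bs, cur)).2])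
          = blocksWrites (bs ++ [cur]) ++ aws (some (cur.getLast?.getD 0)) rest
        ∧ (((rest.foldl groupStep (bs, cur)).1 ++ [(rest.foldl groupStep (bs, cur)).2]).length : Int)
          = ((bs ++ [cur]).length : Int) + cnt (some (cur.getLast?.getD 0)) rest := by
  induction rest with
  | nil => intro bs cur h; simp [aws, cnt]
  | cons j rest ih =>
    intro bs cur h
    by_cases hj : j = cur.getLast?.getD 0 + 1
    · have hstep : groupStep (bs, cur) j = (bs, cur ++ [j]) := by
        simp [groupStep, hj]
      have hcur' : cur ++ [j] ≠ [] := by simp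
      obtain ⟨ih1, ih2⟩ := ih bs (cur ++ [j]) hcur'
      have hlast : (cur ++ [j]).getLast?.getD 0 = j := by
        simp
      constructor
      · rw [List.foldl_cons, hstep, ih1, hlast,
          blocksWrites_append_singleton bs (cur ++ [j]),
          blockWrites_append_singleton cur j h,
          blocksWrites_append_singleton bs cur]
        have : aws (some (cur.getLast?.getD 0)) (j :: rest)
            = (j, (-1 : Int)) :: aws (some j) rest := by
          simp [aws]; omega
        rw [this]; simp
      · rw [List.foldl_cons, hstep, ih2, hlast]
        have : cnt (some (cur.getLast?.getD 0)) (j :: rest) = 0 + cnt (some j) rest := by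
          simp [cnt]; omega
        rw [this]; simp
    · have hstep : groupStep (bs, cur) j = (bs ++ [cur], [j]) := by
        simp [groupStep, hj]
      have hcur' : ([j] : List Int) ≠ [] := by simp
      obtain ⟨ih1, ih2⟩ := ih (bs ++ [cur]) [j] hcur'
      have hlast : ([j] : List Int).getLast?.getD 0 = j := rfl
      constructor
      · rw [List.foldl_cons, hstep, ih1, hlast,
          blocksWrites_append_singleton (bs ++ [cur]) [j],
          blocksWrites_append_singleton bs cur]
        have : aws (some (cur.getLast?.getD 0)) (j :: rest)
            = (j, (1 : Int)) :: aws (some j) rest := by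
          simp [aws]; omega
        rw [this]
        have : blockWrites [j] = [(j, (1 : Int))] := rfl
        simp [this]
      · rw [List.foldl_cons, hstep, ih2, hlast]
        have : cnt (some (cur.getLast?.getD 0)) (j :: rest) = 1 + cnt (some j) rest := by
          simp [cnt]; omega
        rw [this]; simp; omega

-- the members of S_k at positions ≥ j
def Ssfx (L : List Int) (k j : Int) : List Int :=
  (PySem.List.pyRange j k 1).filter (fun x => PySem.List.pyGetD L (x - 1) 0 == 1) ++ [k]

-- B's dense scan from position j onward produces the same writes and the same run-start count,
-- where pv is the last member before j (invariant: pv < j, and prev ⟺ pv = j-1).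
theorem bloop_spec (L : List Int) (k : Int) :
    ∀ (t : Nat) (j : Int), 1 ≤ j → k = j + t →
      ∀ (c : List Int) (p : Int) (prev : Bool) (pv : Option Int),
        (∀ v, pv = some v → v < j) → (prev = true ↔ pv = some (j - 1)) →
        (PySem.List.pyRange j (k + 1) 1).foldl (bStep L k) (c, p, prev)
          = (applyW c (aws pv (Ssfx L k j)), p + cnt pv (Ssfx L k j), true) := by
  intro t
  induction t with
  | zero =>
    intro j hj hk c p prev pv hpv hflag
    have hkj : k = j := by omega
    subst hkj
    rw [PySem.List.pyRange_one_singleton]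
    have hS : Ssfx L k k = [k] := by
      simp [Ssfx, PySem.List.pyRange_one_eq_nil (le_refl k)]
    rw [hS, List.foldl_cons, List.foldl_nil]
    have hmem : (k == k || PySem.List.pyGetD L (k - 1) 0 == 1) = true := by simp
    cases hprev : prev with
    | true =>
      have hpveq : pv = some (k - 1) := hflag.mp hprev
      simp [bStep, aws, cnt, hpveq, applyW]
    | false =>
      have hpvne : pv ≠ some (k - 1) := fun h => by
        have := hflag.mpr h; rw [hprev] at this; exact Bool.false_ne_true this
      simp [bStep, aws, cnt, hpvne, applyW]
  | succ t ih =>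
    intro j hj hk c p prev pv hpv hflag
    have hjk : j < k := by omega
    rw [PySem.List.pyRange_one_cons (by omega : j < k + 1), List.foldl_cons]
    have hjk' : (j == k) = false := by simp; omega
    have hrange : PySem.List.pyRange j k 1 = j :: PySem.List.pyRange (j + 1) k 1 :=
      PySem.List.pyRange_one_cons hjk
    by_cases hb : PySem.List.pyGetD L (j - 1) 0 = 1
    · -- position j is a member (a 1-bit below k)
      have hmem : (j == k || PySem.List.pyGetD L (j - 1) 0 == 1) = true := by
        simp [hjk', hb]
      have hS : Ssfx L k j = j :: Ssfx L k (j + 1) := by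
        simp [Ssfx, hrange, hb]
      have hpv' : ∀ v, (some j : Option Int) = some v → v < j + 1 := by
        intro v hv; injection hv with h; omega
      have hflag' : (true = true) ↔ (some j : Option Int) = some (j + 1 - 1) := by
        constructor
        · intro _; congr 1; omega
        · intro _; rfl
      cases hprev : prev with
      | true =>
        have hpveq : pv = some (j - 1) := hflag.mp hprev
        have hstep : bStep L k (c, p, true) j
            = (PySem.List.pySetD c (j - 1) (-1), p, true) := by
          simp [bStep, hmem]
        rw [hstep, ih (j + 1) (by omega) (by omega) _ p true (some j) hpv' hflag']
        rw [hS]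
        have haws : aws pv (j :: Ssfx L k (j + 1))
            = (j, (-1 : Int)) :: aws (some j) (Ssfx L k (j + 1)) := by
          simp [aws, hpveq]
        have hcnt : cnt pv (j :: Ssfx L k (j + 1)) = 0 + cnt (some j) (Ssfx L k (j + 1)) := by
          simp [cnt, hpveq]
        rw [haws, hcnt, applyW_cons]
        simp
      | false =>
        have hpvne : pv ≠ some (j - 1) := fun h => by
          have := hflag.mpr h; rw [hprev] at this; exact Bool.false_ne_true this
        have hstep : bStep L k (c, p, false) j
            = (PySem.List.pySetD c (j - 1) 1, p + 1, true) := by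
          simp [bStep, hmem]
        rw [hstep, ih (j + 1) (by omega) (by omega) _ (p + 1) true (some j) hpv' hflag']
        rw [hS]
        have haws : aws pv (j :: Ssfx L k (j + 1))
            = (j, (1 : Int)) :: aws (some j) (Ssfx L k (j + 1)) := by
          simp [aws, hpvne]
        have hcnt : cnt pv (j :: Ssfx L k (j + 1)) = 1 + cnt (some j) (Ssfx L k (j + 1)) := by
          simp [cnt, hpvne]
        rw [haws, hcnt, applyW_cons]
        simp [add_assoc]
    · -- position j is not a member
      have hmem : (j == k || PySem.List.pyGetD L (j - 1) 0 == 1) = false := by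
        simp [hjk', hb]
      have hS : Ssfx L k j = Ssfx L k (j + 1) := by
        simp [Ssfx, hrange, hb]
      have hpv' : ∀ v, pv = some v → v < j + 1 := by
        intro v hv; have := hpv v hv; omega
      have hflag' : (false = true) ↔ pv = some (j + 1 - 1) := by
        constructor
        · intro h; exact absurd h (by simp)
        · intro h
          have : j + 1 - 1 < j := hpv _ h
          omega
      have hstep : bStep L k (c, p, prev) j = (c, p, false) := by
        simp [bStep, hmem]
      rw [hstep, ih (j + 1) (by omega) (by omega) c p false pv hpv' hflag', hS]

-- the two per-k bodies agree for every k ≥ 1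
theorem akBody_eq_bkBody (L : List Int) (N : Nat) (k : Int) (hk : 1 ≤ k) :
    akBody L N k = bkBody L N k := by
  set F := (PySem.List.pyRange 1 k 1).filter (fun j => PySem.List.pyGetD L (j - 1) 0 == 1) with hF
  have hSsfx : Ssfx L k 1 = F ++ [k] := by rw [Ssfx, hF]
  -- B side
  have hB : bkBody L N k
      = (applyW (List.replicate N 0) (aws none (F ++ [k])),
         cnt none (F ++ [k]) - 1) := by
    rw [bkBody]
    rw [bloop_spec L k (k - 1).toNat 1 (le_refl 1) (by omega) (List.replicate N 0) 0 false none
      (by intro v hv; cases hv) (by simp), hSsfx]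
    simp
  -- A side: S_k = F ++ [k] is nonempty
  rcases hFc : F with _ | ⟨f0, ftl⟩
  · -- F = [], S_k = [k]
    have hS : F ++ [k] = [k] := by rw [hFc]; rfl
    rw [akBody, hB]
    simp only [← hF, hS]
    rw [foldl_writeBlock_eq]
    simp [blocksWrites, blockWrites, aws, cnt]
  · have hS : F ++ [k] = f0 :: (ftl ++ [k]) := by rw [hFc]; rfl
    rw [akBody, hB]
    simp only [← hF, hS]
    obtain ⟨g1, g2⟩ := group_spec (ftl ++ [k]) [] [f0] (by simp)
    have hlast : ([f0] : List Int).getLast?.getD 0 = f0 := rfl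
    rw [hlast] at g1 g2
    have hbw : blocksWrites ([] ++ [[f0]]) = [(f0, (1 : Int))] := by
      simp [blocksWrites, blockWrites]
    have haws : aws none (f0 :: (ftl ++ [k]))
        = (f0, (1 : Int)) :: aws (some f0) (ftl ++ [k]) := by simp [aws]
    have hcnt : cnt none (f0 :: (ftl ++ [k])) = 1 + cnt (some f0) (ftl ++ [k]) := by
      simp [cnt]
    rw [foldl_writeBlock_eq, g1, hbw, g2, haws, hcnt]
    simp

-- ===== VERDICT (by name: the statement is the Claim_ definition above) =====
theorem generate_theorem1_spec : Claim_equal_generate_theorem1 := by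
  intro b n _ _
  unfold Spec_generate_theorem1 generate_theorem1 generate_theorem1_alt
  apply PySem.List.foldl_congr_mem
  intro acc k hkmem
  have hk : 1 ≤ k := ((PySem.List.mem_pyRange_one).mp hkmem).1
  rw [akBody_eq_bkBody _ _ _ hk]
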